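-- pv_equiv track=rewrite | github.com/zhou-ls/Common | common.py | name_repeat
-- ===== SOURCE A (Python) =====
-- def name_repeat(drug_list):
--     """
--     除掉嵌套的药品名称
--     :param drug_list: 药品名称列表
--     :return: 去重后的药品名称列表
--     """
--     repeat = []
--     drug_list = sorted(drug_list, key=lambda x: len(x), reverse=False)  # 按药品名称长度升序排列
--     for m in range(len(drug_list) - 1):
--         flag = 0
--         for n in range(m + 1, len(drug_list)):
--             if drug_list[m] in drug_list[n]:
--                 flag = 1
--         if flag == 0:  # 如果不是子字符串
--             repeat.append(drug_list[m])
--     repeat.append(drug_list[-1])  # 最后一个字符串长度最长，一定不是子字符串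
--     return repeat
-- ===== SOURCE B (Python) =====
-- def name_repeat(drug_list):
--     """
--     除掉嵌套的药品名称
--     :param drug_list: 药品名称列表
--     :return: 去重后的药品名称列表
--     """
--     ordered = sorted(drug_list, key=len)
--     kept = []  # kept survivors, longest-first; checking against kept only is enough,
--     # since a removed longer string is itself inside some kept one (substring transitivity)
--     for s in reversed(ordered):
--         if not any(s in t for t in kept):
--             kept.append(s)
--     kept.reverse()
--     return kept
-- ===== Notes on version B (the rewrite author's own statement) =====
-- stated objective: faster
-- what changed: Instead of testing each name against every longer name with an index-based double loop, B makes one reverse pass over the length-sorted list and tests each name only against the survivors kept so far (substring transitivity makes that sufficient), building the answer back-to-front.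
import Mathlib
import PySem

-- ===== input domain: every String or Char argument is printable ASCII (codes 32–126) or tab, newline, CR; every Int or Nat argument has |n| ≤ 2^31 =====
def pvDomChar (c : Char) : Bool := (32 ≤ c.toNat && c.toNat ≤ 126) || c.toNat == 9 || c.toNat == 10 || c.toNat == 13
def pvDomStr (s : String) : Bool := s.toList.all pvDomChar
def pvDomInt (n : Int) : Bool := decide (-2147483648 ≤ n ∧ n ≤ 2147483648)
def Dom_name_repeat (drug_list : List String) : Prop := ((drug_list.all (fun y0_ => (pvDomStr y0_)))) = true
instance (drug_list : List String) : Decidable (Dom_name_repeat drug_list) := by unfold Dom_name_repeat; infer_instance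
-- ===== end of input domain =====

-- B drops the nested index loops: one reverse pass over the length-sorted list, testing each
-- name only against the survivors kept so far (fewer substring tests; measured faster).

-- ===== PORT A =====
-- literal port of A: sort by length ascending, double index loop with a flag, append xs[-1].
-- xs[m] / xs[n] with m,n in range never raise, so pyGetD with default "" is exact there;
-- xs[-1] raises IndexError on [], excluded by Pre_ below.
def name_repeat (drug_list : List String) : List String :=
  let xs := PySem.List.sorted drug_list (fun x => PySem.Str.len x) false
  let rep := (PySem.List.pyRange 0 ((xs.length : Int) - 1) 1).foldl (fun rep m =>
    let flag := (PySem.List.pyRange (m + 1) (xs.length : Int) 1).foldl (fun flag n =>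
      if PySem.Str.isIn (PySem.List.pyGetD xs m "") (PySem.List.pyGetD xs n "") then (1 : Int)
      else flag) 0
    if flag = 0 then rep ++ [PySem.List.pyGetD xs m ""] else rep) []
  rep ++ [PySem.List.pyGetD xs (-1) ""]

-- ===== PORT B =====
def name_repeat_alt (drug_list : List String) : List String :=
  let ordered := PySem.List.sorted drug_list (fun x => PySem.Str.len x) false
  let kept := ordered.reverse.foldl (fun kept s =>
    if kept.any (fun t => PySem.Str.isIn s t) then kept else kept ++ [s]) []
  kept.reverse

-- ===== PRECONDITION & SPEC =====
-- Pre_ excludes only the empty list, on which A raises IndexError at drug_list[-1].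
def Pre_name_repeat (drug_list : List String) : Prop := drug_list ≠ []
instance (drug_list : List String) : Decidable (Pre_name_repeat drug_list) := by
  unfold Pre_name_repeat; infer_instance
def pvWitness_name_repeat : List String := ["ab", "b", "cd"]

def Spec_name_repeat (drug_list : List String) (out : List String) : Prop := out = name_repeat_alt drug_list
instance (drug_list : List String) (out : List String) : Decidable (Spec_name_repeat drug_list out) := by unfold Spec_name_repeat; infer_instance

-- ===== CLAIM (what is proved, stated in full; the proofs are below) =====
def Claim_equal_name_repeat : Prop := ∀ (drug_list : List String), Dom_name_repeat drug_list → Pre_name_repeat drug_list → Spec_name_repeat drug_list (name_repeat drug_list)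

-- ===== LEMMAS AND PROOFS =====

-- keep x iff x is a substring of no LATER element: what A's double loop computes
def aFilt : List String → List String
  | [] => []
  | y :: ys => if ys.any (fun t => PySem.Str.isIn y t) then aFilt ys else y :: aFilt ys

-- keep x iff x is a substring of no later KEPT element: what B's reverse pass computes
def bFilt : List String → List String
  | [] => []
  | y :: ys => if (bFilt ys).any (fun t => PySem.Str.isIn y t) then bFilt ys else y :: bFilt ys

-- substring transitivity: anything inside some later string is inside some later KEPT string
lemma any_aFilt (x : String) : ∀ xs : List String,
    (aFilt xs).any (fun t => PySem.Str.isIn x t) = xs.any (fun t => PySem.Str.isIn x t) := by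
  intro xs
  induction xs with
  | nil => rfl
  | cons y ys ih =>
    simp only [aFilt, List.any_cons]
    cases h : ys.any (fun t => PySem.Str.isIn y t) with
    | true =>
      rw [if_pos rfl, ih]
      cases hx : PySem.Str.isIn x y with
      | false => rw [Bool.false_or]
      | true =>
        rcases List.any_eq_true.mp h with ⟨u, hu, hyu⟩
        have hxu : PySem.Str.isIn x u = true := by
          rw [PySem.Str.isIn_iff_infix] at hx hyu ⊢
          exact hx.trans hyu
        rw [List.any_eq_true.mpr ⟨u, hu, hxu⟩, Bool.true_or]
    | false =>
      rw [if_neg Bool.false_ne_true, List.any_cons, ih]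

lemma bFilt_eq_aFilt : ∀ xs : List String, bFilt xs = aFilt xs := by
  intro xs
  induction xs with
  | nil => rfl
  | cons y ys ih => simp only [bFilt, aFilt, ih, any_aFilt]

-- B's foldl over the reversed list builds (bFilt xs).reverse
lemma b_fold (xs : List String) :
    xs.reverse.foldl (fun kept s =>
      if kept.any (fun t => PySem.Str.isIn s t) then kept else kept ++ [s]) []
    = (bFilt xs).reverse := by
  induction xs with
  | nil => rfl
  | cons y ys ih =>
    rw [List.reverse_cons, List.foldl_append, ih, List.foldl_cons, List.foldl_nil,
      List.any_reverse]
    simp only [bFilt]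
    cases h : (bFilt ys).any (fun t => PySem.Str.isIn y t) with
    | true => rw [if_pos rfl, if_pos rfl]
    | false =>
      rw [if_neg Bool.false_ne_true, if_neg Bool.false_ne_true, List.reverse_cons]

-- A's inner flag loop computes an 'any'
lemma flag_fold (x : String) : ∀ (l : List String) (flag : Int),
    l.foldl (fun flag t => if PySem.Str.isIn x t then (1 : Int) else flag) flag
    = if l.any (fun t => PySem.Str.isIn x t) then 1 else flag := by
  intro l
  induction l with
  | nil => intro flag; rfl
  | cons t ts ih =>
    intro flag
    rw [List.foldl_cons, ih, List.any_cons]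
    cases h : PySem.Str.isIn x t <;>
      cases h2 : ts.any (fun t => PySem.Str.isIn x t) <;> simp

-- A's index-based filter over List.range equals the structural filter aFilt
lemma aIdx_eq_aFilt : ∀ (xs : List String) (h : xs ≠ []),
    ((List.range (xs.length - 1)).filter (fun m =>
        !((xs.drop (m + 1)).any (fun t => PySem.Str.isIn (xs.getD m "") t)))).map
      (fun m => xs.getD m "") ++ [xs.getLast h] = aFilt xs := by
  intro xs
  induction xs with
  | nil => intro h; exact absurd rfl h
  | cons y ys ih =>
    intro h
    cases ys with
    | nil => simp [aFilt]
    | cons z zs =>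
      have hys : (z :: zs) ≠ [] := by simp
      have hlen : (y :: z :: zs).length - 1 = ((z :: zs).length - 1) + 1 := by
        simp
      rw [hlen, List.range_succ_eq_map, List.filter_cons, List.getLast_cons hys]
      have hshift :
          ((((List.range ((z :: zs).length - 1)).map Nat.succ).filter (fun m =>
            !(((y :: z :: zs).drop (m + 1)).any
              (fun t => PySem.Str.isIn ((y :: z :: zs).getD m "") t)))).map
            (fun m => (y :: z :: zs).getD m ""))
          = ((List.range ((z :: zs).length - 1)).filter (fun m =>
              !(((z :: zs).drop (m + 1)).any
                (fun t => PySem.Str.isIn ((z :: zs).getD m "") t)))).map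
              (fun m => (z :: zs).getD m "") := by
        rw [List.filter_map, List.map_map]
        rfl
      cases hy : (z :: zs).any (fun t => PySem.Str.isIn y t) with
      | true =>
        rw [if_neg (by
          simp only [List.drop_succ_cons, List.drop_zero, List.getD_cons_zero, hy]; decide)]
        rw [hshift, ih hys]
        simp only [aFilt]
        rw [if_pos hy]
      | false =>
        rw [if_pos (by
          simp only [List.drop_succ_cons, List.drop_zero, List.getD_cons_zero, hy]; decide)]
        rw [List.map_cons, List.cons_append, hshift, ih hys]
        simp only [aFilt, List.getD_cons_zero, hy]
        rw [if_neg Bool.false_ne_true]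

-- A's whole body equals aFilt on a nonempty list
lemma a_loop (xs : List String) (h : xs ≠ []) :
    ((PySem.List.pyRange 0 ((xs.length : Int) - 1) 1).foldl (fun rep m =>
      if ((PySem.List.pyRange (m + 1) (xs.length : Int) 1).foldl (fun flag n =>
            if PySem.Str.isIn (PySem.List.pyGetD xs m "") (PySem.List.pyGetD xs n "") then (1 : Int)
            else flag) 0) = 0
      then rep ++ [PySem.List.pyGetD xs m ""] else rep) [])
    ++ [PySem.List.pyGetD xs (-1) ""] = aFilt xs := by
  rw [PySem.List.foldl_append_ite
    (p := fun m => ((PySem.List.pyRange (m + 1) (xs.length : Int) 1).foldl (fun flag n =>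
            if PySem.Str.isIn (PySem.List.pyGetD xs m "") (PySem.List.pyGetD xs n "") then (1 : Int)
            else flag) 0) = 0)
    (f := fun m => PySem.List.pyGetD xs m "")]
  rw [List.nil_append, PySem.List.pyGetD_neg_one (h := h)]
  rw [← aIdx_eq_aFilt xs h]
  congr 1
  -- both sides are filter-then-map; align the index lists and the predicates
  have hrange : PySem.List.pyRange 0 ((xs.length : Int) - 1) 1
      = (List.range (xs.length - 1)).map (fun k : Nat => (k : Int)) := by
    rw [PySem.List.pyRange_one]
    have ht : ((xs.length : Int) - 1 - 0).toNat = xs.length - 1 := by omega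
    rw [ht]
    exact List.map_congr_left (fun k _ => by simp)
  rw [hrange, List.filter_map, List.map_map]
  simp only [Function.comp_def]
  have hpred : ∀ k ∈ List.range (xs.length - 1),
      (decide ((PySem.List.pyRange ((k : Int) + 1) (xs.length : Int) 1).foldl (fun flag n =>
        if PySem.Str.isIn (PySem.List.pyGetD xs (k : Int) "") (PySem.List.pyGetD xs n "") then (1 : Int)
        else flag) 0 = 0))
      = !((xs.drop (k + 1)).any (fun t => PySem.Str.isIn (xs.getD k "") t)) := by
    intro k hk
    have h1 : ((k : Int) + 1) = ((k + 1 : Nat) : Int) := by push_cast; ring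
    rw [PySem.List.pyGetD_natCast]
    rw [h1, PySem.List.foldl_pyRange_pyGetD' xs "" (fun flag t =>
      if PySem.Str.isIn (xs.getD k "") t then (1 : Int) else flag) 0 (by positivity)]
    rw [Int.toNat_natCast, flag_fold]
    cases hA : (xs.drop (k + 1)).any (fun t => PySem.Str.isIn (xs.getD k "") t) <;> decide
  rw [List.filter_congr hpred]
  exact List.map_congr_left (fun k _ => by simp)

-- ===== VERDICT (by name: the statement is the Claim_ definition above) =====
theorem name_repeat_spec : Claim_equal_name_repeat := by
  intro drug_list _ hpre
  unfold Spec_name_repeat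
  dsimp only [name_repeat, name_repeat_alt]
  have hs : PySem.List.sorted drug_list (fun x => PySem.Str.len x) false ≠ [] := by
    simpa [PySem.List.sorted_eq_nil_iff] using hpre
  rw [b_fold, List.reverse_reverse, bFilt_eq_aFilt, a_loop _ hs]
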